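-- pv_equiv track=rewrite | github.com/srh-bzd/QuikAmpliclean | src/keep_sequences_by_length.py | discriminate_by_length
-- ===== SOURCE A (Python) =====
-- def discriminate_by_length(fastqDict, min_length, max_length):
--     """
--     Detects reads that are too long or too short
--     """
--     seqWrongLength = {"too_long":[], "too_short":[]}
--     seqGoodLength = []
--     for seqId in fastqDict.keys():
--         if len(fastqDict[seqId]["seq"]) < min_length:
--             seqWrongLength["too_short"].append(seqId)
--         elif len(fastqDict[seqId]["seq"]) > max_length:
--             seqWrongLength["too_long"].append(seqId)
--         else:
--             seqGoodLength.append(seqId)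
--     return seqGoodLength, seqWrongLength
-- ===== SOURCE B (Python) =====
-- def discriminate_by_length(fastqDict, min_length, max_length):
--     """
--     Detects reads that are too long or too short
--     """
--     good = [k for k, v in fastqDict.items() if min_length <= len(v["seq"]) <= max_length]
--     too_long = [k for k, v in fastqDict.items() if len(v["seq"]) > max_length]
--     too_short = [k for k, v in fastqDict.items() if len(v["seq"]) < min_length]
--     return good, {"too_long": too_long, "too_short": too_short}
-- ===== Notes on version B (the rewrite author's own statement) =====
-- stated objective: idiomatic
-- what changed: A's single loop that branches per read and mutates a bucket dict is replaced by three independent filtered list comprehensions, one per bucket; Pre_ excludes records without a 'seq' key (A raises KeyError) and the degenerate corner min_length > max_length with a read strictly between them, where which 'wrong' bucket such a read lands in is anybody's choice (A: only too_short; B: both buckets).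
import Mathlib
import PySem

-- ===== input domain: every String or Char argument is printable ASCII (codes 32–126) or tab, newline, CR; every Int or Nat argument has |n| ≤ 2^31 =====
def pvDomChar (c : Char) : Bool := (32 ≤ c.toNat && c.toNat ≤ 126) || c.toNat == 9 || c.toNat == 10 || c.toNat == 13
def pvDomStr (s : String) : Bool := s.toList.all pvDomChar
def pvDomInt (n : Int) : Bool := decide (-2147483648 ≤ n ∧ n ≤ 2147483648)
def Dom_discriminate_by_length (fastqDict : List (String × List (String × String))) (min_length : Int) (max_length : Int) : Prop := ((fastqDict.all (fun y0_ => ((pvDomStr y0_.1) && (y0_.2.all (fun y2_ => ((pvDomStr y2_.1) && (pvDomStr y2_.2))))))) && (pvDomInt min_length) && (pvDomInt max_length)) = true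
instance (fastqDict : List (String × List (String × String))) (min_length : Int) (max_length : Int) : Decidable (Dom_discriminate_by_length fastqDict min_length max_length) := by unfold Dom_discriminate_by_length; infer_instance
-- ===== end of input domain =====

-- B replaces A's single branching loop with dict mutation by three independent
-- filtered comprehensions, one per bucket (objective: idiomatic; not faster).

-- length of record["seq"]; the getD default "" is exact on Pre_ (KeyError excluded there)
def pvSeqLen (record : List (String × String)) : Int :=
  PySem.Str.len ((PySem.Dict.ofList record).getD "seq" "")

-- ===== PORT A =====
def discriminate_by_length (fastqDict : List (String × List (String × String))) (min_length : Int) (max_length : Int) : List String × (List (String × List String)) :=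
  let d := PySem.Dict.ofList fastqDict
  let res := d.keys.foldl (fun st seqId =>
    if pvSeqLen (d.getD seqId []) < min_length then
      (st.1, st.2.modify "too_short" [] (· ++ [seqId]))
    else if pvSeqLen (d.getD seqId []) > max_length then
      (st.1, st.2.modify "too_long" [] (· ++ [seqId]))
    else
      (st.1 ++ [seqId], st.2))
    (([] : List String), PySem.Dict.ofList [("too_long", ([] : List String)), ("too_short", ([] : List String))])
  (res.1, res.2.items)

-- ===== PORT B =====
def discriminate_by_length_alt (fastqDict : List (String × List (String × String))) (min_length : Int) (max_length : Int) : List String × (List (String × List String)) :=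
  let items := (PySem.Dict.ofList fastqDict).items
  let good := (items.filter (fun p => min_length ≤ pvSeqLen p.2 && pvSeqLen p.2 ≤ max_length)).map (·.1)
  let tooLong := (items.filter (fun p => max_length < pvSeqLen p.2)).map (·.1)
  let tooShort := (items.filter (fun p => pvSeqLen p.2 < min_length)).map (·.1)
  (good, [("too_long", tooLong), ("too_short", tooShort)])

-- ===== PRECONDITION & SPEC =====
-- Pre_ excludes (a) inputs where A raises KeyError: some read record (after dict
-- key-deduplication) has no "seq" entry; and (b) the degenerate corner where
-- min_length > max_length and some read's length lies strictly between them —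
-- such a read is both too short and too long, which wrong bucket it lands in is
-- anybody's choice (A lists it only under too_short, B under both buckets).
def Pre_discriminate_by_length (fastqDict : List (String × List (String × String))) (min_length : Int) (max_length : Int) : Prop :=
  ∀ p ∈ (PySem.Dict.ofList fastqDict).items,
    "seq" ∈ p.2.map Prod.fst ∧ ¬ (pvSeqLen p.2 < min_length ∧ max_length < pvSeqLen p.2)
instance (fastqDict : List (String × List (String × String))) (min_length : Int) (max_length : Int) : Decidable (Pre_discriminate_by_length fastqDict min_length max_length) := by unfold Pre_discriminate_by_length; infer_instance

def pvWitness_discriminate_by_length : (List (String × List (String × String))) × Int × Int :=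
  ([("r1", [("seq", "ACGT")]), ("r2", [("seq", "A")])], 2, 5)

def Spec_discriminate_by_length (fastqDict : List (String × List (String × String))) (min_length : Int) (max_length : Int) (out : List String × (List (String × List String))) : Prop := out = discriminate_by_length_alt fastqDict min_length max_length
instance (fastqDict : List (String × List (String × String))) (min_length : Int) (max_length : Int) (out : List String × (List (String × List String))) : Decidable (Spec_discriminate_by_length fastqDict min_length max_length out) := by unfold Spec_discriminate_by_length; infer_instance

-- ===== CLAIM (what is proved, stated in full; the proofs are below) =====
def Claim_equal_discriminate_by_length : Prop := ∀ (fastqDict : List (String × List (String × String))) (min_length : Int) (max_length : Int), Dom_discriminate_by_length fastqDict min_length max_length → Pre_discriminate_by_length fastqDict min_length max_length → Spec_discriminate_by_length fastqDict min_length max_length (discriminate_by_length fastqDict min_length max_length)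

-- ===== LEMMAS AND PROOFS =====

-- A's loop over any key list, with any accumulators, equals three filters.
theorem pvLoopA (len : String → Int) (mn mx : Int) :
    ∀ (l g tl ts : List String),
      l.foldl (fun st seqId =>
        if len seqId < mn then
          (st.1, st.2.modify "too_short" [] (· ++ [seqId]))
        else if len seqId > mx then
          (st.1, st.2.modify "too_long" [] (· ++ [seqId]))
        else
          (st.1 ++ [seqId], st.2))
        (g, PySem.Dict.mk [("too_long", tl), ("too_short", ts)])
      = (g ++ l.filter (fun k => mn ≤ len k && len k ≤ mx),
         PySem.Dict.mk [("too_long", tl ++ l.filter (fun k => mn ≤ len k && mx < len k)),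
                        ("too_short", ts ++ l.filter (fun k => len k < mn))]) := by
  intro l
  induction l with
  | nil => intro g tl ts; simp
  | cons x xs ih =>
    intro g tl ts
    by_cases h1 : len x < mn
    · simp only [List.foldl_cons, if_pos h1]
      have hm : (PySem.Dict.mk [("too_long", tl), ("too_short", ts)]).modify "too_short" ([] : List String) (· ++ [x])
          = PySem.Dict.mk [("too_long", tl), ("too_short", ts ++ [x])] := rfl
      rw [hm, ih]
      simp [h1, show ¬ (mn ≤ len x) by omega]
    · by_cases h2 : len x > mx
      · simp only [List.foldl_cons, if_neg h1, if_pos h2]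
        have hm : (PySem.Dict.mk [("too_long", tl), ("too_short", ts)]).modify "too_long" ([] : List String) (· ++ [x])
            = PySem.Dict.mk [("too_long", tl ++ [x]), ("too_short", ts)] := rfl
        rw [hm, ih]
        simp [h1, h2, show mn ≤ len x by omega, show ¬ (len x ≤ mx) by omega]
      · simp only [List.foldl_cons, if_neg h1, if_neg h2]
        rw [ih]
        simp [h1, h2, show mn ≤ len x by omega, show len x ≤ mx by omega]

-- ===== VERDICT (by name: the statement is the Claim_ definition above) =====
theorem discriminate_by_length_spec : Claim_equal_discriminate_by_length := by
  intro fastqDict mn mx _ hpre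
  unfold Spec_discriminate_by_length discriminate_by_length discriminate_by_length_alt
  dsimp only
  set d := PySem.Dict.ofList fastqDict with hd
  have hnd : d.keys.Nodup := PySem.Dict.nodup_keys_ofList fastqDict
  have hitems : d.items = d.keys.map (fun k => (k, d.getD k [])) :=
    PySem.Dict.items_eq_map_keys d hnd []
  have hinit : PySem.Dict.ofList [("too_long", ([] : List String)), ("too_short", ([] : List String))]
      = PySem.Dict.mk [("too_long", []), ("too_short", [])] := rfl
  rw [hinit, pvLoopA (fun k => pvSeqLen (d.getD k [])) mn mx d.keys [] [] []]
  -- the too_long filters agree on every key of d, by Pre_'s part (b)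
  have hfl : d.keys.filter (fun k => mn ≤ pvSeqLen (d.getD k []) && mx < pvSeqLen (d.getD k []))
      = d.keys.filter (fun k => mx < pvSeqLen (d.getD k [])) := by
    apply List.filter_congr
    intro k hk
    have hb := (hpre (k, d.getD k []) (by rw [hitems]; exact List.mem_map.mpr ⟨k, hk, rfl⟩)).2
    dsimp only at hb
    by_cases h : mx < pvSeqLen (d.getD k [])
    · simp [h, show mn ≤ pvSeqLen (d.getD k []) by omega]
    · simp [h]
  simp only [hitems, List.filter_map, List.map_map, hfl]
  simp [Function.comp_def]
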